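-- pv_equiv track=rewrite | github.com/mlvillarroya/AoC2023 | days/day03a.py | lookForNumber
-- ===== SOURCE A (Python) =====
-- def lookForNumber(instructions: list[list[str]], row:int, startColumn:int):
--     catchedNumber = False
--     foundNumberStartColumn = -1
--     foundNumberEndColumn = -1
--     for j in range (startColumn, len(instructions[row])):
--         if not catchedNumber and instructions[row][j].isnumeric():
--             foundNumberStartColumn = j
--             catchedNumber = True
--         if catchedNumber and instructions[row][j].isnumeric() and j == len(instructions[row])-1:
--             foundNumberEndColumn = j
--         if catchedNumber and not instructions[row][j].isnumeric():
--             foundNumberEndColumn = j-1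
--             break
--     return [foundNumberStartColumn, foundNumberEndColumn]
-- ===== SOURCE B (Python) =====
-- def lookForNumber(instructions: list[list[str]], row: int, startColumn: int):
--     # Backward dynamic programming over suffixes: ans holds the answer for a scan
--     # starting at column j+1; walking j from the right end down to startColumn
--     # updates it by the recurrence f(j) = f(j+1) if row[j] is not numeric, else
--     # [j, f(j+1)[1]] when the next cell is numeric too, else [j, j].
--     rowStr = instructions[row]
--     n = len(rowStr)
--     ans = [-1, -1]          # answer for the empty scan starting at n
--     nextNumeric = False     # whether column j+1 is numeric
--     for j in range(n - 1, startColumn - 1, -1):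
--         if rowStr[j].isnumeric():
--             ans = [j, ans[1] if nextNumeric else j]
--             nextNumeric = True
--         else:
--             nextNumeric = False
--     return ans
-- ===== Notes on version B (the rewrite author's own statement) =====
-- stated objective: alternative
-- what changed: A's left-to-right flag-machine scan with an early break is replaced by a right-to-left suffix dynamic program: walking from the row's end down to startColumn, maintain the answer for a scan starting one column to the right and combine it with the current cell via the recurrence f(j)=f(j+1) if non-numeric else [j, f(j+1)[1] or j].
import Mathlib
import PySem

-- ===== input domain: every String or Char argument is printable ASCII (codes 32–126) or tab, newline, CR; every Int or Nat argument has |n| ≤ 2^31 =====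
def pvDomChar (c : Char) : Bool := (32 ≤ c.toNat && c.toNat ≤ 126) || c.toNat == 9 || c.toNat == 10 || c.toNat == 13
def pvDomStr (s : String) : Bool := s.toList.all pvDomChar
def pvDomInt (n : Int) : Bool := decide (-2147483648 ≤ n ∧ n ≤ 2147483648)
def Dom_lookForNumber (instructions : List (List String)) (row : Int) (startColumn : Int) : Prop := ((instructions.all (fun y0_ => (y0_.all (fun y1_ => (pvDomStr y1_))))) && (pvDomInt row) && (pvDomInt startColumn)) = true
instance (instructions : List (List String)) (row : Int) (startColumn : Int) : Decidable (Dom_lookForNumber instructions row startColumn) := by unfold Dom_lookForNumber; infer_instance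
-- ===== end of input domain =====

-- B replaces A's left-to-right flag-machine scan (caught/start/end state, early break)
-- by a right-to-left suffix dynamic program: walking from the row's end down to
-- startColumn it maintains the answer for a scan starting one column to the right.
-- Objective: alternative decomposition; same O(n) cost.

-- ===== PORT A =====
-- str.isnumeric() ported as PySem.Str.strIsdigit: exact on the printable-ASCII domain Dom_.
-- A's for-loop with `break`, state (catchedNumber, foundNumberStartColumn, foundNumberEndColumn):
def lookA_loop (rowStr : List String) (n : Int) : List Int → Bool → Int → Int → Int × Int
  | [], _, s, e => (s, e)
  | j :: rest, caught, s, e =>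
    let num := PySem.Str.strIsdigit (PySem.List.pyGetD rowStr j "")
    let caught' := if !caught && num then true else caught
    let s' := if !caught && num then j else s
    let e' := if caught' && num && (j == n - 1) then j else e
    if caught' && !num then (s', j - 1)
    else lookA_loop rowStr n rest caught' s' e'

def lookForNumber (instructions : List (List String)) (row : Int) (startColumn : Int) : List Int :=
  let rowStr := PySem.List.pyGetD instructions row []
  let n : Int := rowStr.length
  let r := lookA_loop rowStr n (PySem.List.pyRange startColumn n 1) false (-1) (-1)
  [r.1, r.2]

-- ===== PORT B =====
-- Source B's backward loop `for j in range(n-1, startColumn-1, -1)` with state (ans, nextNumeric):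
def lookB_loop (rowStr : List String) : List Int → Int × Int → Bool → Int × Int
  | [], ans, _ => ans
  | j :: rest, ans, nxt =>
    if PySem.Str.strIsdigit (PySem.List.pyGetD rowStr j "") then
      lookB_loop rowStr rest (j, if nxt then ans.2 else j) true
    else
      lookB_loop rowStr rest ans false

def lookForNumber_alt (instructions : List (List String)) (row : Int) (startColumn : Int) : List Int :=
  let rowStr := PySem.List.pyGetD instructions row []
  let n : Int := rowStr.length
  let r := lookB_loop rowStr (PySem.List.pyRange (n - 1) (startColumn - 1) (-1)) (-1, -1) false
  [r.1, r.2]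

-- ===== PRECONDITION & SPEC =====
-- Pre_: exactly where Python A returns (row a valid Python index; startColumn not below
-- -len(row), where the first subscript instructions[row][startColumn] would raise IndexError).
def Pre_lookForNumber (instructions : List (List String)) (row : Int) (startColumn : Int) : Prop :=
  PySem.Raise.InRange instructions.length row ∧
    -((PySem.List.pyGetD instructions row []).length : Int) ≤ startColumn
instance (instructions : List (List String)) (row : Int) (startColumn : Int) : Decidable (Pre_lookForNumber instructions row startColumn) := by unfold Pre_lookForNumber; infer_instance

def pvWitness_lookForNumber : List (List String) × Int × Int := ([[".", "1", "2", "."]], 0, 0)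

def Spec_lookForNumber (instructions : List (List String)) (row : Int) (startColumn : Int) (out : List Int) : Prop := out = lookForNumber_alt instructions row startColumn
instance (instructions : List (List String)) (row : Int) (startColumn : Int) (out : List Int) : Decidable (Spec_lookForNumber instructions row startColumn out) := by unfold Spec_lookForNumber; infer_instance

-- ===== CLAIM (what is proved, stated in full; the proofs are below) =====
def Claim_equal_lookForNumber : Prop := ∀ (instructions : List (List String)) (row : Int) (startColumn : Int), Dom_lookForNumber instructions row startColumn → Pre_lookForNumber instructions row startColumn → Spec_lookForNumber instructions row startColumn (lookForNumber instructions row startColumn)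

-- ===== LEMMAS AND PROOFS =====

-- Proof-side reference form of the answer: first numeric column, then end of its run.
def findStart (rowStr : List String) : List Int → Option Int
  | [] => none
  | j :: rest =>
    if PySem.Str.strIsdigit (PySem.List.pyGetD rowStr j "") then some j
    else findStart rowStr rest

def scanEnd (rowStr : List String) (n k : Int) : Int :=
  if h : k < n then
    if PySem.Str.strIsdigit (PySem.List.pyGetD rowStr k "") then scanEnd rowStr n (k + 1)
    else k - 1
  else k - 1
termination_by (n - k).toNat
decreasing_by omega

def refAns (rowStr : List String) (n a : Int) : Int × Int :=
  match findStart rowStr (PySem.List.pyRange a n 1) with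
  | none => (-1, -1)
  | some s => (s, scanEnd rowStr n s)

-- Once A's flag is set at start s, the rest of A's loop computes exactly the end-scan.
theorem caught_phase (rowStr : List String) (n : Int) :
    ∀ (m : Nat) (k s e : Int), (n - k).toNat = m → k ≤ n → (k = n → e = n - 1) →
      lookA_loop rowStr n (PySem.List.pyRange k n 1) true s e = (s, scanEnd rowStr n k) := by
  intro m
  induction m with
  | zero =>
    intro k s e hm hk he
    have hkn : k = n := by omega
    subst hkn
    rw [PySem.List.pyRange_one_eq_nil le_rfl, scanEnd]
    simp [lookA_loop, he rfl]
  | succ m ih =>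
    intro k s e hm hk he
    have hlt : k < n := by omega
    rw [PySem.List.pyRange_one_cons hlt, scanEnd]
    by_cases hnum : PySem.Chars.strIsdigit (PySem.List.pyGetD rowStr k "").toList = true
    · have := ih (k + 1) s (if (k == n - 1) then k else e) (by omega) (by omega)
        (by intro h; have : k = n - 1 := by omega
            simp [this])
      simp only [lookA_loop, dif_pos hlt]
      simp [hnum]
      simpa using this
    · simp only [Bool.not_eq_true] at hnum
      simp only [lookA_loop, dif_pos hlt]
      simp [hnum]

-- Before the flag is set, A's loop searches for the first numeric column.
theorem scan_phase (rowStr : List String) (n : Int) :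
    ∀ (m : Nat) (a : Int), (n - a).toNat = m →
      lookA_loop rowStr n (PySem.List.pyRange a n 1) false (-1) (-1) = refAns rowStr n a := by
  intro m
  induction m with
  | zero =>
    intro a hm
    rw [PySem.List.pyRange_one_eq_nil (by omega)]
    simp [lookA_loop, refAns, PySem.List.pyRange_one_eq_nil (show n ≤ a by omega), findStart]
  | succ m ih =>
    intro a hm
    have hlt : a < n := by omega
    rw [PySem.List.pyRange_one_cons hlt]
    by_cases hnum : PySem.Chars.strIsdigit (PySem.List.pyGetD rowStr a "").toList = true
    · have hc := caught_phase rowStr n (n - (a + 1)).toNat (a + 1) a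
        (if (a == n - 1) then a else (-1)) rfl (by omega)
        (by intro h; have : a = n - 1 := by omega
            simp [this])
      have hsc : scanEnd rowStr n a = scanEnd rowStr n (a + 1) := by
        rw [scanEnd]; simp [dif_pos hlt, hnum]
      simp only [lookA_loop, refAns]
      rw [PySem.List.pyRange_one_cons hlt]
      simp [findStart, hnum, hsc]
      simpa using hc
    · simp only [Bool.not_eq_true] at hnum
      simp only [lookA_loop, refAns]
      rw [PySem.List.pyRange_one_cons hlt]
      simp only [findStart]
      have := ih (a + 1) (by omega)
      simp only [refAns] at this
      simpa [hnum] using this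

-- The predicate is false one past the end of the row.
theorem pred_at_len (rowStr : List String) :
    PySem.Chars.strIsdigit (PySem.List.pyGetD rowStr (rowStr.length : Int) "").toList = false := by
  simp [PySem.List.pyGetD, PySem.List.pyGet?, PySem.List.pyIdx?]
  decide

theorem scanEnd_of_num (rowStr : List String) (n k : Int) (hk : k < n)
    (h : PySem.Chars.strIsdigit (PySem.List.pyGetD rowStr k "").toList = true) :
    scanEnd rowStr n k = scanEnd rowStr n (k + 1) := by
  rw [scanEnd]; simp [dif_pos hk, h]

theorem scanEnd_stop (rowStr : List String) (n k : Int)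
    (h : ¬ k < n ∨ PySem.Chars.strIsdigit (PySem.List.pyGetD rowStr k "").toList = false) :
    scanEnd rowStr n k = k - 1 := by
  rw [scanEnd]
  rcases h with h | h
  · simp [dif_neg h]
  · split_ifs with h1 h2
    · simp [h] at h2
    · rfl
    · rfl

theorem refAns_cons_num (rowStr : List String) (n k : Int) (hk : k < n)
    (h : PySem.Chars.strIsdigit (PySem.List.pyGetD rowStr k "").toList = true) :
    refAns rowStr n k = (k, scanEnd rowStr n k) := by
  simp only [refAns]
  rw [PySem.List.pyRange_one_cons hk]
  simp [findStart, h]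

-- refAns is unchanged stepping right over a non-numeric column.
theorem refAns_of_not_num (rowStr : List String) (n a : Int) (ha : a < n)
    (h : PySem.Chars.strIsdigit (PySem.List.pyGetD rowStr a "").toList = false) :
    refAns rowStr n a = refAns rowStr n (a + 1) := by
  simp only [refAns]
  rw [PySem.List.pyRange_one_cons ha]
  simp [findStart, h]

-- B's backward loop, fed the answer-so-far for the suffix, computes refAns.
theorem back_phase (rowStr : List String) (n : Int) (hn : n = (rowStr.length : Int)) :
    ∀ (fuel : Nat) (m a : Int), (m - (a - 1)).toNat = fuel → a - 1 ≤ m → m ≤ n - 1 →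
      lookB_loop rowStr (PySem.List.pyRange m (a - 1) (-1)) (refAns rowStr n (m + 1))
        (PySem.Chars.strIsdigit (PySem.List.pyGetD rowStr (m + 1) "").toList) = refAns rowStr n a := by
  intro fuel
  induction fuel with
  | zero =>
    intro m a hm h1 h2
    have : m = a - 1 := by omega
    subst this
    rw [PySem.List.pyRange_neg_one_eq_nil le_rfl]
    simp only [lookB_loop]
    congr 1; omega
  | succ fuel ih =>
    intro m a hm h1 h2
    have hmn : m < n := by omega
    rw [PySem.List.pyRange_neg_one_cons (show a - 1 < m by omega)]
    have ihm := ih (m - 1) a (by omega) (by omega) (by omega)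
    rw [show m - 1 + 1 = m by omega] at ihm
    by_cases hP : PySem.Chars.strIsdigit (PySem.List.pyGetD rowStr m "").toList = true
    · -- current column numeric: the updated state is refAns at m
      have hstep : ((m : Int),
          if PySem.Chars.strIsdigit (PySem.List.pyGetD rowStr (m + 1) "").toList = true then
            (refAns rowStr n (m + 1)).2 else m) = refAns rowStr n m := by
        rw [refAns_cons_num rowStr n m hmn hP]
        by_cases hP1 : PySem.Chars.strIsdigit (PySem.List.pyGetD rowStr (m + 1) "").toList = true
        · have hm1n : m + 1 < n := by
            by_contra hc
            have he : m + 1 = (rowStr.length : Int) := by omega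
            rw [he, pred_at_len] at hP1
            exact absurd hP1 (by simp)
          rw [refAns_cons_num rowStr n (m + 1) hm1n hP1,
            scanEnd_of_num rowStr n m hmn hP]
          simp [hP1]
        · simp only [Bool.not_eq_true] at hP1
          rw [scanEnd_of_num rowStr n m hmn hP,
            scanEnd_stop rowStr n (m + 1) (Or.inr hP1)]
          simp [hP1]
      rw [hP] at ihm
      simp only [lookB_loop]
      simp only [PySem.Str.strIsdigit_eq, hP, if_true]
      rw [hstep]
      simpa using ihm
    · simp only [Bool.not_eq_true] at hP
      rw [hP] at ihm
      simp only [lookB_loop]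
      simp only [PySem.Str.strIsdigit_eq, hP, Bool.false_eq_true, if_false]
      rw [← refAns_of_not_num rowStr n m hmn hP]
      simpa using ihm

-- ===== VERDICT (by name: the statement is the Claim_ definition above) =====
theorem lookForNumber_spec : Claim_equal_lookForNumber := by
  intro instructions row startColumn _ _
  unfold Spec_lookForNumber
  set rowStr := PySem.List.pyGetD instructions row [] with hrow
  set n : Int := (rowStr.length : Int) with hn
  have hA := scan_phase rowStr n (n - startColumn).toNat startColumn rfl
  by_cases hsc : startColumn ≤ n
  · have hinit : refAns rowStr n (n - 1 + 1) = (-1, -1) := by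
      simp only [refAns]
      rw [show n - 1 + 1 = n by omega, PySem.List.pyRange_one_eq_nil le_rfl]
      simp [findStart]
    have hP0 : PySem.Chars.strIsdigit (PySem.List.pyGetD rowStr (n - 1 + 1) "").toList = false := by
      rw [show n - 1 + 1 = n by omega, hn]; exact pred_at_len rowStr
    have hB := back_phase rowStr n hn ((n - 1) - (startColumn - 1)).toNat (n - 1) startColumn
      rfl (by omega) le_rfl
    rw [hinit, hP0] at hB
    simp only [lookForNumber, lookForNumber_alt]
    rw [← hrow]
    simp only [← hn]
    rw [hA, ← hB]
  · -- startColumn > n: both loops run over an empty range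
    have hBe : PySem.List.pyRange (n - 1) (startColumn - 1) (-1) = [] :=
      PySem.List.pyRange_neg_one_eq_nil (by omega)
    have hAe : PySem.List.pyRange startColumn n 1 = [] :=
      PySem.List.pyRange_one_eq_nil (by omega)
    simp only [lookForNumber, lookForNumber_alt]
    rw [← hrow]
    simp only [← hn]
    rw [hBe, hAe]
    simp [lookA_loop, lookB_loop]
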